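-- pv_equiv track=rewrite | github.com/punitkashyup/ForkFlix | backend/app/services/multimodal_ai_service.py | _determine_difficulty_advanced
-- ===== SOURCE A (Python) =====
-- from typing import Dict, Any, List, Optional, AsyncGenerator
--
-- def _determine_difficulty_advanced(ingredients: List[str], cooking_time: int, text: str) -> str:
--     """Advanced difficulty determination"""
--     difficulty_score = 0
--
--     # Ingredient complexity
--     if len(ingredients) > 12:
--         difficulty_score += 3
--     elif len(ingredients) > 8:
--         difficulty_score += 2
--     elif len(ingredients) > 5:
--         difficulty_score += 1
--
--     # Time complexity
--     if cooking_time > 120: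
--         difficulty_score += 3
--     elif cooking_time > 60:
--         difficulty_score += 2
--     elif cooking_time > 30:
--         difficulty_score += 1
--
--     # Technique complexity
--     advanced_techniques = [
--         'tempering', 'emulsify', 'clarify', 'reduction', 'confit',
--         'sous vide', 'ferment', 'cure', 'smoke', 'braise'
--     ]
--
--     text_lower = text.lower()
--     for technique in advanced_techniques:
--         if technique in text_lower:
--             difficulty_score += 2
--
--     # Equipment complexity
--     if any(equip in text_lower for equip in ['stand mixer', 'food processor', 'mandoline']):
--         difficulty_score += 1
--
--     if difficulty_score >= 6:
--         return "Hard"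
--     elif difficulty_score >= 3:
--         return "Medium"
--     else:
--         return "Easy"
-- ===== SOURCE B (Python) =====
-- def _scan_keywords(kws, tl):
--     """One left-to-right pass over tl: collect every keyword of kws that
--     starts at some position into a single found-set."""
--     found = set()
--     for j in range(len(tl)):
--         tail = tl[j:]
--         for kw in kws:
--             if tail.startswith(kw):
--                 found.add(kw)
--     return found
--
--
-- def _determine_difficulty_advanced(ingredients, cooking_time, text):
--     """Single scan of the text collecting all keywords into one found-set
--     (instead of one full containment scan per keyword), then score from the
--     set and from counts of exceeded numeric thresholds."""
--     techniques = ['tempering', 'emulsify', 'clarify', 'reduction', 'confit',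
--                   'sous vide', 'ferment', 'cure', 'smoke', 'braise']
--     equipment = ['stand mixer', 'food processor', 'mandoline']
--     found = _scan_keywords(techniques + equipment, text.lower())
--     score = 2 * sum(1 for kw in techniques if kw in found)
--     score += 1 if any(e in found for e in equipment) else 0
--     score += sum(1 for t in (5, 8, 12) if len(ingredients) > t)
--     score += sum(1 for t in (30, 60, 120) if cooking_time > t)
--     return "Hard" if score >= 6 else "Medium" if score >= 3 else "Easy"
-- ===== Notes on version B (the rewrite author's own statement) =====
-- stated objective: alternative
-- what changed: Instead of one full substring-containment scan of the text per keyword, B makes a single left-to-right pass over the text collecting, at each position, every keyword that starts there into one found-set, and then scores from that set plus counts of exceeded numeric thresholds before the same >=6/>=3 cut.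
import Mathlib
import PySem

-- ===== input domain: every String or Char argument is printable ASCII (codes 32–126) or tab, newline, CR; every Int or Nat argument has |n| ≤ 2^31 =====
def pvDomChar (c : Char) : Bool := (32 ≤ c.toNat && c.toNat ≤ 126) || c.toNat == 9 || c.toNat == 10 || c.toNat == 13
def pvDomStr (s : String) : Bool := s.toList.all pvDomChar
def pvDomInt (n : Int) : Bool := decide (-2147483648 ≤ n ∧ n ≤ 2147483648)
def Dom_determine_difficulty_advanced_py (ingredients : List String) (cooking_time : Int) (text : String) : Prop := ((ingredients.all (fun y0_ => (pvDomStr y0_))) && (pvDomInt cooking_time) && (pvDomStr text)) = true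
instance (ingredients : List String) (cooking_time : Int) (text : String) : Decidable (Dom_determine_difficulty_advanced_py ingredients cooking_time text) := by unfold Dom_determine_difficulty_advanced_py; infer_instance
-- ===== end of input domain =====

-- B replaces A's per-keyword substring scans by one left-to-right pass over the text that
-- collects every keyword starting at each position into a found-set, then scores from that
-- set and from counts of exceeded numeric thresholds (alternative algorithm; not faster).


-- ===== PORT A =====
def determine_difficulty_advanced_py (ingredients : List String) (cooking_time : Int) (text : String) : String :=
  let difficulty_score : Int := 0
  let difficulty_score :=
    if ingredients.length > 12 then difficulty_score + 3
    else if ingredients.length > 8 then difficulty_score + 2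
    else if ingredients.length > 5 then difficulty_score + 1
    else difficulty_score
  let difficulty_score :=
    if cooking_time > 120 then difficulty_score + 3
    else if cooking_time > 60 then difficulty_score + 2
    else if cooking_time > 30 then difficulty_score + 1
    else difficulty_score
  let advanced_techniques : List String :=
    ["tempering", "emulsify", "clarify", "reduction", "confit",
     "sous vide", "ferment", "cure", "smoke", "braise"]
  let text_lower := PySem.Str.lower text
  let difficulty_score := advanced_techniques.foldl
    (fun acc technique => if PySem.Str.isIn technique text_lower then acc + 2 else acc)
    difficulty_score
  let difficulty_score :=
    if (["stand mixer", "food processor", "mandoline"].any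
          (fun equip => PySem.Str.isIn equip text_lower))
    then difficulty_score + 1 else difficulty_score
  if difficulty_score ≥ 6 then "Hard"
  else if difficulty_score ≥ 3 then "Medium"
  else "Easy"

-- ===== PORT B =====
-- B's helper _scan_keywords: one pass over positions of tl, collecting every keyword
-- that starts at each position into one found-set (tail = tl[j:], tail.startswith(kw)).
def pvScanKeywords (kws : List String) (tl : String) : PySem.Set String :=
  (PySem.List.pyRange 0 (PySem.Str.len tl) 1).foldl
    (fun found j =>
      kws.foldl (fun found kw =>
        if PySem.Str.startswith (PySem.Str.slice tl (some j) none) kw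
        then PySem.Set.add found kw else found) found)
    PySem.Set.empty

def determine_difficulty_advanced_py_alt (ingredients : List String) (cooking_time : Int) (text : String) : String :=
  let techniques : List String :=
    ["tempering", "emulsify", "clarify", "reduction", "confit",
     "sous vide", "ferment", "cure", "smoke", "braise"]
  let equipment : List String := ["stand mixer", "food processor", "mandoline"]
  let found := pvScanKeywords (techniques ++ equipment) (PySem.Str.lower text)
  let score : Int :=
    2 * techniques.foldl (fun acc kw => acc + (if PySem.Set.contains found kw then (1 : Int) else 0)) 0
  let score := score + (if equipment.any (fun e => PySem.Set.contains found e) then 1 else 0)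
  let score := score +
    ([5, 8, 12] : List Int).foldl
      (fun acc t => acc + (if (ingredients.length : Int) > t then 1 else 0)) 0
  let score := score +
    ([30, 60, 120] : List Int).foldl
      (fun acc t => acc + (if cooking_time > t then 1 else 0)) 0
  if score ≥ 6 then "Hard" else if score ≥ 3 then "Medium" else "Easy"

-- ===== PRECONDITION & SPEC =====
def Spec_determine_difficulty_advanced_py (ingredients : List String) (cooking_time : Int) (text : String) (out : String) : Prop := out = determine_difficulty_advanced_py_alt ingredients cooking_time text
instance (ingredients : List String) (cooking_time : Int) (text : String) (out : String) : Decidable (Spec_determine_difficulty_advanced_py ingredients cooking_time text out) := by unfold Spec_determine_difficulty_advanced_py; infer_instance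

-- ===== CLAIM (what is proved, stated in full; the proofs are below) =====
def Claim_equal_determine_difficulty_advanced_py : Prop := ∀ (ingredients : List String) (cooking_time : Int) (text : String), Dom_determine_difficulty_advanced_py ingredients cooking_time text → Spec_determine_difficulty_advanced_py ingredients cooking_time text (determine_difficulty_advanced_py ingredients cooking_time text)

-- ===== LEMMAS AND PROOFS =====

-- membership in B's inner keyword fold
theorem mem_inner_fold (p : String → Bool) (kws : List String) (f : PySem.Set String) (y : String) :
    y ∈ kws.foldl (fun f kw => if p kw then PySem.Set.add f kw else f) f ↔
      y ∈ f ∨ (y ∈ kws ∧ p y = true) := by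
  induction kws generalizing f with
  | nil => simp
  | cons a kws ih =>
      simp only [List.foldl_cons, ih]
      by_cases hpa : p a = true <;> simp [hpa, PySem.Set.mem_add] <;> aesop

-- membership in B's position scan
theorem mem_scan_fold (q : Int → String → Bool) (kws : List String) (js : List Int)
    (s : PySem.Set String) (y : String) :
    y ∈ js.foldl
        (fun f j => kws.foldl (fun f kw => if q j kw then PySem.Set.add f kw else f) f) s ↔
      y ∈ s ∨ (y ∈ kws ∧ ∃ j ∈ js, q j y = true) := by
  induction js generalizing s with
  | nil => simp
  | cons j js ih =>
      simp only [List.foldl_cons, ih, mem_inner_fold]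
      aesop

-- the found-set of the scan answers exactly the substring-containment questions
theorem contains_scan (kws : List String) (tl : String) (y : String)
    (hy : y ∈ kws) (hne : y.toList ≠ []) :
    PySem.Set.contains (pvScanKeywords kws tl) y = PySem.Str.isIn y tl := by
  rw [Bool.eq_iff_iff, PySem.Set.contains_iff]
  unfold pvScanKeywords
  rw [mem_scan_fold (fun j kw => PySem.Str.startswith (PySem.Str.slice tl (some j) none) kw)]
  have hlen : PySem.Str.len tl = (tl.toList.length : Int) := by
    simp [PySem.Str.len]
  constructor
  · rintro (h | ⟨-, j, hj, hq⟩)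
    · simp [PySem.Set.empty] at h
    · rw [PySem.List.mem_pyRange_one] at hj
      rw [PySem.Str.isIn_eq, ← PySem.Chars.exists_prefix_drop_iff_isIn]
      refine ⟨j.toNat, ?_⟩
      rw [PySem.Str.startswith_eq, PySem.Chars.startswith_iff] at hq
      rwa [show (PySem.Str.slice tl (some j) none).toList = tl.toList.drop j.toNat by
        simp [PySem.Str.slice, PySem.Chars.slice_eq_listSlice, PySem.List.slice_from _ hj.1]]
        at hq
  · intro h
    rw [PySem.Str.isIn_eq, ← PySem.Chars.exists_prefix_drop_iff_isIn] at h
    obtain ⟨j, hpre⟩ := h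
    have hjlt : j < tl.toList.length := by
      by_contra hge
      rw [Nat.not_lt] at hge
      rw [List.drop_eq_nil_of_le hge, List.prefix_nil] at hpre
      exact hne hpre
    refine Or.inr ⟨hy, (j : Int), ?_, ?_⟩
    · rw [PySem.List.mem_pyRange_one, hlen]
      exact ⟨Int.natCast_nonneg j, by exact_mod_cast hjlt⟩
    · rw [PySem.Str.startswith_eq, PySem.Chars.startswith_iff]
      rwa [show (PySem.Str.slice tl (some (j : Int)) none).toList = tl.toList.drop j by
        simp [PySem.Str.slice, PySem.Chars.slice_eq_listSlice,
          PySem.List.slice_from _ (Int.natCast_nonneg j)]]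

-- B-shaped counting fold shifts its start value out
theorem foldB_shift (p : String → Bool) (L : List String) (s : Int) :
    L.foldl (fun acc t => acc + (if p t then (1 : Int) else 0)) s =
      s + L.foldl (fun acc t => acc + (if p t then (1 : Int) else 0)) 0 := by
  induction L generalizing s with
  | nil => simp
  | cons a L ih =>
      simp only [List.foldl_cons]
      rw [ih, ih (0 + _)]
      ring

-- A's 'score += 2 per matching keyword' loop equals twice B's counting fold
theorem foldA_shift (p : String → Bool) (L : List String) (s : Int) :
    L.foldl (fun acc t => if p t then acc + 2 else acc) s =
      s + 2 * L.foldl (fun acc t => acc + (if p t then (1 : Int) else 0)) 0 := by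
  induction L generalizing s with
  | nil => simp
  | cons a L ih =>
      simp only [List.foldl_cons]
      rw [ih, foldB_shift p L (0 + _)]
      split_ifs <;> ring

-- A's nested ingredient elif chain equals B's count of exceeded thresholds
theorem ing_chain (n : Nat) (s : Int) :
    (if n > 12 then s + 3 else if n > 8 then s + 2 else if n > 5 then s + 1 else s) =
      s + (((0 + (if (n : Int) > 5 then (1 : Int) else 0)) +
            (if (n : Int) > 8 then (1 : Int) else 0)) +
            (if (n : Int) > 12 then (1 : Int) else 0)) := by
  split_ifs <;> omega

-- A's nested time elif chain equals B's count of exceeded thresholds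
theorem time_chain (c : Int) (s : Int) :
    (if c > 120 then s + 3 else if c > 60 then s + 2 else if c > 30 then s + 1 else s) =
      s + (((0 + (if c > 30 then (1 : Int) else 0)) +
            (if c > 60 then (1 : Int) else 0)) +
            (if c > 120 then (1 : Int) else 0)) := by
  split_ifs <;> omega

-- A's conditional '+1' equals adding an indicator
theorem ite_add_one (c : Prop) [Decidable c] (s : Int) :
    (if c then s + 1 else s) = s + (if c then (1 : Int) else 0) := by
  split_ifs <;> ring

theorem classify_congr (s t : Int) (h : s = t) :
    (if s ≥ 6 then "Hard" else if s ≥ 3 then "Medium" else "Easy") =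
      (if t ≥ 6 then "Hard" else if t ≥ 3 then "Medium" else "Easy") := by
  rw [h]

theorem ab_eq (ingredients : List String) (cooking_time : Int) (text : String) :
    determine_difficulty_advanced_py ingredients cooking_time text =
      determine_difficulty_advanced_py_alt ingredients cooking_time text := by
  simp only [determine_difficulty_advanced_py, determine_difficulty_advanced_py_alt]
  apply classify_congr
  rw [foldA_shift]
  simp only [List.foldl_cons, List.foldl_nil, List.any_cons, List.any_nil, Bool.or_false]
  rw [contains_scan _ _ "tempering" (by decide) (by decide),
    contains_scan _ _ "emulsify" (by decide) (by decide),
    contains_scan _ _ "clarify" (by decide) (by decide),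
    contains_scan _ _ "reduction" (by decide) (by decide),
    contains_scan _ _ "confit" (by decide) (by decide),
    contains_scan _ _ "sous vide" (by decide) (by decide),
    contains_scan _ _ "ferment" (by decide) (by decide),
    contains_scan _ _ "cure" (by decide) (by decide),
    contains_scan _ _ "smoke" (by decide) (by decide),
    contains_scan _ _ "braise" (by decide) (by decide),
    contains_scan _ _ "stand mixer" (by decide) (by decide),
    contains_scan _ _ "food processor" (by decide) (by decide),
    contains_scan _ _ "mandoline" (by decide) (by decide)]
  rw [ing_chain, time_chain, ite_add_one]
  ring

-- ===== VERDICT (by name: the statement is the Claim_ definition above) =====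
theorem determine_difficulty_advanced_py_spec : Claim_equal_determine_difficulty_advanced_py := by
  intro ingredients cooking_time text _
  exact ab_eq ingredients cooking_time text
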